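-- pv_equiv track=rewrite | github.com/MostFerrixx/Gemelos_Digital | enhanced_fallback_system.py | generate_warehouse_large_matrix
-- ===== SOURCE A (Python) =====
-- def generate_warehouse_large_matrix(width, height):
--     """Generar matriz de almacén grande"""
--     matrix = []
--
--     for y in range(height):
--         row = []
--         for x in range(width):
--             # Zona de entrada (primeras 3 filas)
--             if y < 3:
--                 tile = 1  # Zona despejada
--             # Zona de carga (últimas 3 filas)
--             elif y > height - 4:
--                 tile = 1  # Zona despejada
--             # Corredor central
--             elif y == height // 2:
--                 tile = 1  # Corredor principal
--             # Racks organizados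
--             elif (y - 3) % 5 in [1, 2, 3] and 3 <= x <= width-4:
--                 if x % 6 in [1, 2, 3, 4]:
--                     tile = 0  # Racks
--                 else:
--                     tile = 1  # Pasillos
--             else:
--                 tile = 1  # Navegable
--
--             row.append(tile)
--         matrix.append(row)
--
--     return matrix
-- ===== SOURCE B (Python) =====
-- def generate_warehouse_large_matrix(width, height):
--     """Generar matriz de almacen grande: start all-clear, paint rack cells"""
--     matrix = [[1] * width for _ in range(height)]
--     mid = height // 2
--     # rack row bands start at y=4 and repeat every 5 rows; racks stop above the
--     # load zone (y <= height-4); the central corridor row is skipped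
--     band_starts = range(4, max(height - 3, 4), 5)
--     if band_starts:
--         # rack column cells, computed once: blocks x0+1..x0+4 for
--         # x0 = 0, 6, 12, ..., clipped to the aisle margins [3, width-4]
--         rack_cols = [x for x0 in range(0, width, 6)
--                      for x in range(max(x0 + 1, 3), min(x0 + 5, width - 3))]
--         for y0 in band_starts:
--             for y in range(y0, min(y0 + 3, height - 3)):
--                 if y == mid:
--                     continue
--                 row = matrix[y]
--                 for x in rack_cols:
--                     row[x] = 0
--     return matrix
-- ===== Notes on version B (the rewrite author's own statement) =====
-- stated objective: faster
-- what changed: Instead of evaluating A's per-cell elif ladder at every grid cell, B creates an all-clear grid in one shot, precomputes the rack column cells once, and stamps 0s only into the rack cells, iterating directly over the periodic rack row bands (rows 5k+4..5k+6 clipped to the rack zone, skipping the central corridor).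
import Mathlib
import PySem

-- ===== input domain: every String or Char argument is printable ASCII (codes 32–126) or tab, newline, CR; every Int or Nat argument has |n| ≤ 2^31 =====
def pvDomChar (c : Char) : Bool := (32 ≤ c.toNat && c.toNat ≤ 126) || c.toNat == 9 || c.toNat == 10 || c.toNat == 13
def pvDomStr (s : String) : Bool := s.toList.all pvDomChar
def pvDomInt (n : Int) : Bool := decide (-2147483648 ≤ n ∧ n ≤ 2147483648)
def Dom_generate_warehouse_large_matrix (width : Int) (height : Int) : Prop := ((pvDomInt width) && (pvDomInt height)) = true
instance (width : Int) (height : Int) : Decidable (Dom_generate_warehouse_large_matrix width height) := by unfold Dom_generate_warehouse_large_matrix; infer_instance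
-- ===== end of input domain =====

-- B builds an all-clear grid and stamps 0s only into the periodic rack cells
-- (sparse painting) instead of evaluating A's elif ladder at every cell;
-- same value everywhere; a timing run measured B faster by a constant factor.

-- ===== PORT A =====
def generate_warehouse_large_matrix (width : Int) (height : Int) : List (List Int) :=
  (PySem.List.pyRange 0 height 1).foldl (fun matrix y =>
    let row := (PySem.List.pyRange 0 width 1).foldl (fun row x =>
      let tile : Int :=
        if y < 3 then 1
        else if y > height - 4 then 1
        else if y = PySem.Int.floordiv height 2 then 1
        else if PySem.Int.mod (y - 3) 5 ∈ ([1, 2, 3] : List Int) ∧ 3 ≤ x ∧ x ≤ width - 4 then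
          if PySem.Int.mod x 6 ∈ ([1, 2, 3, 4] : List Int) then 0 else 1
        else 1
      row ++ [tile]) []
    matrix ++ [row]) []

-- ===== PORT B =====
-- 'rack_cols = [x for x0 in range(0, width, 6) for x in range(max(x0+1,3), min(x0+5, width-3))]'
def pvRackCols (width : Int) : List Int :=
  (PySem.List.pyRange 0 width 6).flatMap (fun x0 =>
    PySem.List.pyRange (max (x0 + 1) 3) (min (x0 + 5) (width - 3)) 1)

-- 'for x in rack_cols: row[x] = 0'
def pvPaintRow (width : Int) (row : List Int) : List Int :=
  (pvRackCols width).foldl (fun r x => PySem.List.pySetD r x 0) row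

def generate_warehouse_large_matrix_alt (width : Int) (height : Int) : List (List Int) :=
  let matrix := (PySem.List.pyRange 0 height 1).map (fun _ => List.replicate width.toNat (1 : Int))
  let mid := PySem.Int.floordiv height 2
  let band_starts := PySem.List.pyRange 4 (max (height - 3) 4) 5
  if band_starts = [] then matrix
  else band_starts.foldl (fun m y0 =>
    (PySem.List.pyRange y0 (min (y0 + 3) (height - 3)) 1).foldl (fun m y =>
      if y = mid then m
      else PySem.List.pySetD m y (pvPaintRow width (PySem.List.pyGetD m y []))) m) matrix

-- ===== PRECONDITION & SPEC =====
def Spec_generate_warehouse_large_matrix (width : Int) (height : Int) (out : List (List Int)) : Prop := out = generate_warehouse_large_matrix_alt width height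
instance (width : Int) (height : Int) (out : List (List Int)) : Decidable (Spec_generate_warehouse_large_matrix width height out) := by unfold Spec_generate_warehouse_large_matrix; infer_instance

-- ===== CLAIM (what is proved, stated in full; the proofs are below) =====
def Claim_equal_generate_warehouse_large_matrix : Prop := ∀ (width : Int) (height : Int), Dom_generate_warehouse_large_matrix width height → Spec_generate_warehouse_large_matrix width height (generate_warehouse_large_matrix width height)

-- ===== LEMMAS AND PROOFS =====

-- proof-only view of one clipped block of pvRackCols
def pvPaintSeg (lo hi : Int) (row : List Int) : List Int :=
  (PySem.List.pyRange lo hi 1).foldl (fun r x => PySem.List.pySetD r x 0) row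

theorem pv_paintRow_eq_foldseg (width : Int) (row : List Int) :
    pvPaintRow width row
      = (PySem.List.pyRange 0 width 6).foldl (fun r x0 =>
          pvPaintSeg (max (x0 + 1) 3) (min (x0 + 5) (width - 3)) r) row := by
  rw [pvPaintRow, pvRackCols, List.foldl_flatMap]
  rfl

theorem pv_paintSeg_length (lo hi : Int) (row : List Int) :
    (pvPaintSeg lo hi row).length = row.length := by
  unfold pvPaintSeg
  generalize PySem.List.pyRange lo hi 1 = l
  induction l generalizing row with
  | nil => rfl
  | cons x tl ih => simp [List.foldl_cons, ih, PySem.List.length_pySetD]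

theorem pv_paintSeg_getElem? (lo hi : Int) (h0 : 0 ≤ lo) (row : List Int) (i : Nat) :
    (pvPaintSeg lo hi row)[i]? =
      if lo ≤ (i : Int) ∧ (i : Int) < hi ∧ i < row.length then some 0 else row[i]? := by
  suffices h : ∀ (n : Nat) (lo : Int), 0 ≤ lo → (hi - lo).toNat = n → ∀ (row : List Int),
      (pvPaintSeg lo hi row)[i]? =
        if lo ≤ (i : Int) ∧ (i : Int) < hi ∧ i < row.length then some 0 else row[i]? from
    h _ lo h0 rfl row
  intro n
  induction n with
  | zero =>
    intro lo h0 hn row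
    rw [pvPaintSeg, PySem.List.pyRange_one_eq_nil (by omega), List.foldl_nil]
    split_ifs <;> first | rfl | omega
  | succ n ih =>
    intro lo h0 hn row
    rw [pvPaintSeg, PySem.List.pyRange_one_cons (by omega), List.foldl_cons, ← pvPaintSeg,
      PySem.List.pySetD_of_nonneg _ _ h0, ih (lo + 1) (by omega) (by omega) (row.set lo.toNat 0)]
    rw [List.length_set, List.getElem?_set]
    split_ifs <;> first | rfl | omega | (rw [List.getElem?_eq_none (by omega)])

theorem pv_foldseg_length (l : List Int) (width : Int) (row : List Int) :
    (l.foldl (fun r x0 => pvPaintSeg (max (x0 + 1) 3) (min (x0 + 5) (width - 3)) r) row).length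
      = row.length := by
  induction l generalizing row with
  | nil => rfl
  | cons x tl ih => simp [List.foldl_cons, ih, pv_paintSeg_length]

theorem pv_foldseg_getElem? (l : List Int) (width : Int) (row : List Int) (i : Nat)
    (hlen : width ≤ (row.length : Int)) :
    (l.foldl (fun r x0 => pvPaintSeg (max (x0 + 1) 3) (min (x0 + 5) (width - 3)) r) row)[i]? =
      if ∃ x0 ∈ l, max (x0 + 1) 3 ≤ (i : Int) ∧ (i : Int) < min (x0 + 5) (width - 3)
      then some 0 else row[i]? := by
  induction l generalizing row with
  | nil => simp
  | cons z tl ih =>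
    rw [List.foldl_cons, ih _ (by rw [pv_paintSeg_length]; exact hlen),
      pv_paintSeg_getElem? _ _ (by omega) _ i]
    by_cases htl : ∃ w ∈ tl, max (w + 1) 3 ≤ (i : Int) ∧ (i : Int) < min (w + 5) (width - 3)
    · rw [if_pos htl,
        if_pos (by obtain ⟨w, hw, hc⟩ := htl; exact ⟨w, List.mem_cons_of_mem _ hw, hc⟩)]
    · rw [if_neg htl]
      by_cases hz : max (z + 1) 3 ≤ (i : Int) ∧ (i : Int) < min (z + 5) (width - 3)
      · rw [if_pos ⟨hz.1, hz.2, by omega⟩, if_pos ⟨z, by simp, hz⟩]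
      · rw [if_neg (by rintro ⟨h1, h2, h3⟩; exact hz ⟨h1, h2⟩),
          if_neg (by
            rintro ⟨w, hw, hc⟩
            rcases List.mem_cons.1 hw with h | h
            · exact hz (h ▸ hc)
            · exact htl ⟨w, h, hc⟩)]

theorem pv_x0_exists (width i : Int) (h0 : 0 ≤ i) :
    (∃ x0 ∈ PySem.List.pyRange 0 width 6,
        max (x0 + 1) 3 ≤ i ∧ i < min (x0 + 5) (width - 3)) ↔
      (3 ≤ i ∧ i ≤ width - 4 ∧ PySem.Int.mod i 6 ∈ ([1, 2, 3, 4] : List Int)) := by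
  rw [PySem.Int.mod_eq_emod_of_pos (by norm_num)]
  simp only [List.mem_cons, List.not_mem_nil, or_false]
  constructor
  · rintro ⟨x0, hmem, h1, h2⟩
    rw [PySem.List.mem_pyRange_iff_of_pos (by norm_num)] at hmem
    obtain ⟨ha, hb, k, hk⟩ := hmem
    omega
  · rintro ⟨h1, h2, h3⟩
    refine ⟨6 * (i / 6), ?_, by omega, by omega⟩
    rw [PySem.List.mem_pyRange_iff_of_pos (by norm_num)]
    exact ⟨by omega, by omega, ⟨i / 6, by omega⟩⟩

theorem pv_paintRow_length (width : Int) (row : List Int) :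
    (pvPaintRow width row).length = row.length := by
  rw [pv_paintRow_eq_foldseg]
  exact pv_foldseg_length _ _ _

theorem pv_paintRow_getElem? (width : Int) (row : List Int)
    (hlen : width ≤ (row.length : Int)) (i : Nat) :
    (pvPaintRow width row)[i]? =
      if 3 ≤ (i : Int) ∧ (i : Int) ≤ width - 4 ∧ PySem.Int.mod (i : Int) 6 ∈ ([1, 2, 3, 4] : List Int)
      then some 0 else row[i]? := by
  rw [pv_paintRow_eq_foldseg, pv_foldseg_getElem? _ _ _ _ hlen]
  simp only [pv_x0_exists width (i : Int) (Int.natCast_nonneg i)]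

theorem pv_paintRow_idem (width : Int) (row : List Int) (hlen : width ≤ (row.length : Int)) :
    pvPaintRow width (pvPaintRow width row) = pvPaintRow width row := by
  apply List.ext_getElem?
  intro i
  have hlen2 : width ≤ ((pvPaintRow width row).length : Int) := by
    rw [pv_paintRow_length]; exact hlen
  rw [pv_paintRow_getElem? _ _ hlen2, pv_paintRow_getElem? _ _ hlen]
  split_ifs <;> rfl

theorem pv_rowfold_getElem? (l : List Int) (mid width : Int) (M : List (List Int)) (i : Nat)
    (hl : ∀ y ∈ l, 0 ≤ y ∧ y < (M.length : Int))
    (hrows : ∀ r ∈ M, width ≤ (r.length : Int)) :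
    (l.foldl (fun m y => if y = mid then m
        else PySem.List.pySetD m y (pvPaintRow width (PySem.List.pyGetD m y []))) M)[i]? =
      if (i : Int) ∈ l ∧ (i : Int) ≠ mid then (M[i]?).map (pvPaintRow width) else M[i]? := by
  induction l generalizing M with
  | nil => simp
  | cons y tl ih =>
    have hy := hl y (by simp)
    simp only [List.foldl_cons]
    by_cases hmid : y = mid
    · rw [if_pos hmid, ih M (fun z hz => hl z (by simp [hz])) hrows]
      by_cases h1 : (i : Int) ∈ tl ∧ (i : Int) ≠ mid
      · rw [if_pos h1, if_pos ⟨by simp [h1.1], h1.2⟩]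
      · rw [if_neg h1, if_neg (by
          rintro ⟨hm, hne⟩
          rcases List.mem_cons.1 hm with h | h
          · exact hne (h.trans hmid)
          · exact h1 ⟨h, hne⟩)]
    · rw [if_neg hmid]
      have hyN : y.toNat < M.length := by omega
      rw [PySem.List.pyGetD_eq_getElem M [] hy.1 hy.2,
        PySem.List.pySetD_of_nonneg _ _ hy.1]
      set M' := M.set y.toNat (pvPaintRow width M[y.toNat]) with hM'
      have hlenM' : M'.length = M.length := by simp [hM']
      have hM'get : ∀ j : Nat, M'[j]? =
          if y.toNat = j then (M[j]?).map (pvPaintRow width) else M[j]? := by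
        intro j
        rw [hM', List.getElem?_set]
        by_cases h : y.toNat = j
        · subst h
          rw [if_pos rfl, if_pos rfl, if_pos hyN, List.getElem?_eq_getElem hyN,
            Option.map_some]
        · rw [if_neg h, if_neg h]
      rw [ih M' (fun z hz => by rw [hlenM']; exact hl z (by simp [hz]))
        (fun r hr => by
          rcases List.mem_or_eq_of_mem_set hr with h | h
          · exact hrows r h
          · subst h
            rw [show ((pvPaintRow width M[y.toNat]).length : Int)
                = (M[y.toNat].length : Int) from by rw [pv_paintRow_length]]
            exact hrows _ (List.getElem_mem _))]
      by_cases h1 : (i : Int) ∈ tl ∧ (i : Int) ≠ mid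
      · rw [if_pos h1, if_pos ⟨by simp [h1.1], h1.2⟩, hM'get i]
        by_cases hiy : y.toNat = i
        · rw [if_pos hiy]
          rcases hM : M[i]? with _ | r
          · simp
          · simp only [Option.map_some]
            rw [pv_paintRow_idem width r (hrows r (List.mem_of_getElem? hM))]
        · rw [if_neg hiy]
      · rw [if_neg h1, hM'get i]
        by_cases hiy : (i : Int) = y
        · have hiN : y.toNat = i := by omega
          rw [if_pos hiN, if_pos ⟨by simp [hiy.symm], hiy ▸ hmid⟩]
        · rw [if_neg (fun h => hiy (by omega)), if_neg (by
            rintro ⟨hm, hne⟩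
            rcases List.mem_cons.1 hm with h | h
            · exact hiy h
            · exact h1 ⟨h, hne⟩)]

-- A's per-cell tile, named for the proofs
def pvCellA (width height y x : Int) : Int :=
  if y < 3 then 1
  else if y > height - 4 then 1
  else if y = PySem.Int.floordiv height 2 then 1
  else if PySem.Int.mod (y - 3) 5 ∈ ([1, 2, 3] : List Int) ∧ 3 ≤ x ∧ x ≤ width - 4 then
    if PySem.Int.mod x 6 ∈ ([1, 2, 3, 4] : List Int) then 0 else 1
  else 1

theorem pv_cell_eq (width height y x : Int) (hy : 0 ≤ y ∧ y < height) :
    pvCellA width height y x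
    = if (3 ≤ y ∧ y ≤ height - 4 ∧ PySem.Int.mod (y - 3) 5 ∈ ([1, 2, 3] : List Int))
          ∧ y ≠ PySem.Int.floordiv height 2 then
        (if 3 ≤ x ∧ x ≤ width - 4 ∧ PySem.Int.mod x 6 ∈ ([1, 2, 3, 4] : List Int) then 0 else 1)
      else 1 := by
  unfold pvCellA
  split_ifs <;> simp_all <;> omega

theorem pv_hA (width height : Int) :
    generate_warehouse_large_matrix width height
      = (PySem.List.pyRange 0 height 1).map (fun y =>
          (PySem.List.pyRange 0 width 1).map (fun x => pvCellA width height y x)) := by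
  unfold generate_warehouse_large_matrix
  rw [PySem.List.foldl_append_singleton_eq_map]
  simp only [List.nil_append]
  refine List.map_congr_left fun y _ => ?_
  rw [PySem.List.foldl_append_singleton_eq_map]
  simp only [List.nil_append]
  rfl

theorem pv_y_exists (height i : Int) (h0 : 0 ≤ i) :
    (∃ y0 ∈ PySem.List.pyRange 4 (max (height - 3) 4) 5,
        i ∈ PySem.List.pyRange y0 (min (y0 + 3) (height - 3)) 1) ↔
      (3 ≤ i ∧ i ≤ height - 4 ∧ PySem.Int.mod (i - 3) 5 ∈ ([1, 2, 3] : List Int)) := by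
  rw [PySem.Int.mod_eq_emod_of_pos (by norm_num)]
  simp only [PySem.List.mem_pyRange_one, List.mem_cons, List.not_mem_nil, or_false]
  constructor
  · rintro ⟨y0, hmem, h1, h2⟩
    rw [PySem.List.mem_pyRange_iff_of_pos (by norm_num)] at hmem
    obtain ⟨ha, hb, k, hk⟩ := hmem
    omega
  · rintro ⟨h1, h2, h3⟩
    refine ⟨i - (i - 3) % 5 + 1, ?_, by omega, by omega⟩
    rw [PySem.List.mem_pyRange_iff_of_pos (by norm_num)]
    exact ⟨by omega, by omega, ⟨(i - 3) / 5, by omega⟩⟩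

theorem pv_clearrow_eq (width height y : Int) (hy : 0 ≤ y ∧ y < height)
    (hnot : ¬ ((3 ≤ y ∧ y ≤ height - 4 ∧ PySem.Int.mod (y - 3) 5 ∈ ([1, 2, 3] : List Int))
        ∧ y ≠ PySem.Int.floordiv height 2)) :
    (PySem.List.pyRange 0 width 1).map (fun x => pvCellA width height y x)
      = List.replicate width.toNat 1 := by
  apply List.ext_getElem?
  intro x
  rw [List.getElem?_map, PySem.List.getElem?_pyRange_one, List.getElem?_replicate]
  simp only [zero_add, sub_zero]
  by_cases hx : x < width.toNat
  · rw [if_pos hx, if_pos hx, Option.map_some, pv_cell_eq width height y _ hy, if_neg hnot]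
  · rw [if_neg hx, if_neg hx]
    rfl

theorem pv_rackrow_eq (width height y : Int) (hy : 0 ≤ y ∧ y < height)
    (hrack : (3 ≤ y ∧ y ≤ height - 4 ∧ PySem.Int.mod (y - 3) 5 ∈ ([1, 2, 3] : List Int))
        ∧ y ≠ PySem.Int.floordiv height 2) :
    (PySem.List.pyRange 0 width 1).map (fun x => pvCellA width height y x)
      = pvPaintRow width (List.replicate width.toNat 1) := by
  apply List.ext_getElem?
  intro x
  have hlen : width ≤ ((List.replicate width.toNat (1 : Int)).length : Int) := by
    simp only [List.length_replicate]; omega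
  rw [List.getElem?_map, PySem.List.getElem?_pyRange_one,
    pv_paintRow_getElem? _ _ hlen x, List.getElem?_replicate]
  simp only [zero_add, sub_zero]
  by_cases hcol : 3 ≤ (x : Int) ∧ (x : Int) ≤ width - 4
      ∧ PySem.Int.mod (x : Int) 6 ∈ ([1, 2, 3, 4] : List Int)
  · rw [if_pos hcol, if_pos (show x < width.toNat by omega), Option.map_some,
      pv_cell_eq width height y _ hy, if_pos hrack, if_pos hcol]
  · rw [if_neg hcol]
    by_cases hx : x < width.toNat
    · rw [if_pos hx, if_pos hx, Option.map_some,
        pv_cell_eq width height y _ hy, if_pos hrack, if_neg hcol]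
    · rw [if_neg hx, if_neg hx]
      rfl

theorem pv_main (width height : Int) :
    generate_warehouse_large_matrix width height
      = generate_warehouse_large_matrix_alt width height := by
  rw [pv_hA]
  have halt : generate_warehouse_large_matrix_alt width height
      = (PySem.List.pyRange 4 (max (height - 3) 4) 5).foldl (fun m y0 =>
          (PySem.List.pyRange y0 (min (y0 + 3) (height - 3)) 1).foldl (fun m y =>
            if y = PySem.Int.floordiv height 2 then m
            else PySem.List.pySetD m y (pvPaintRow width (PySem.List.pyGetD m y []))) m)
          ((PySem.List.pyRange 0 height 1).map (fun _ => List.replicate width.toNat (1 : Int))) := by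
    show (if PySem.List.pyRange 4 (max (height - 3) 4) 5 = []
        then (PySem.List.pyRange 0 height 1).map (fun _ => List.replicate width.toNat (1 : Int))
        else _) = _
    by_cases hb : PySem.List.pyRange 4 (max (height - 3) 4) 5 = []
    · rw [if_pos hb, hb, List.foldl_nil]
    · rw [if_neg hb]
  rw [halt, ← List.foldl_flatMap]
  apply List.ext_getElem?
  intro i
  rw [pv_rowfold_getElem? _ _ _ _ i
    (by
      intro y hy
      rw [List.mem_flatMap] at hy
      obtain ⟨y0, hy0, hyy⟩ := hy
      rw [PySem.List.mem_pyRange_iff_of_pos (by norm_num)] at hy0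
      rw [PySem.List.mem_pyRange_one] at hyy
      simp only [List.length_map, PySem.List.length_pyRange_one]
      omega)
    (by
      intro r hr
      rw [List.mem_map] at hr
      obtain ⟨_, _, hr⟩ := hr
      rw [← hr]
      simp only [List.length_replicate]
      omega)]
  have hmem : ((i : Int) ∈ (PySem.List.pyRange 4 (max (height - 3) 4) 5).flatMap
        (fun y0 => PySem.List.pyRange y0 (min (y0 + 3) (height - 3)) 1)) ↔
      (3 ≤ (i : Int) ∧ (i : Int) ≤ height - 4
        ∧ PySem.Int.mod ((i : Int) - 3) 5 ∈ ([1, 2, 3] : List Int)) := by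
    rw [List.mem_flatMap]
    exact pv_y_exists height i (Int.natCast_nonneg i)
  rw [List.getElem?_map, List.getElem?_map, PySem.List.getElem?_pyRange_one]
  simp only [zero_add, sub_zero]
  by_cases hi : i < height.toNat
  · rw [if_pos hi, Option.map_some, Option.map_some]
    have hy : 0 ≤ (i : Int) ∧ (i : Int) < height := by omega
    by_cases hc : ((i : Int) ∈ (PySem.List.pyRange 4 (max (height - 3) 4) 5).flatMap
          (fun y0 => PySem.List.pyRange y0 (min (y0 + 3) (height - 3)) 1))
        ∧ (i : Int) ≠ PySem.Int.floordiv height 2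
    · rw [if_pos hc, Option.map_some]
      exact congrArg some (pv_rackrow_eq width height (i : Int) hy ⟨hmem.1 hc.1, hc.2⟩)
    · rw [if_neg hc]
      exact congrArg some (pv_clearrow_eq width height (i : Int) hy
        (by rintro ⟨h1, h2⟩; exact hc ⟨hmem.2 h1, h2⟩))
  · have hnc : ¬ (((i : Int) ∈ (PySem.List.pyRange 4 (max (height - 3) 4) 5).flatMap
          (fun y0 => PySem.List.pyRange y0 (min (y0 + 3) (height - 3)) 1))
        ∧ (i : Int) ≠ PySem.Int.floordiv height 2) := by
      rintro ⟨hm, -⟩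
      have := hmem.1 hm
      omega
    rw [if_neg hi, Option.map_none, if_neg hnc]
    rfl

-- ===== VERDICT (by name: the statement is the Claim_ definition above) =====
theorem generate_warehouse_large_matrix_spec : Claim_equal_generate_warehouse_large_matrix := by
  intro width height _
  exact pv_main width height
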